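-- pv_equiv track=rewrite | github.com/Rajn013/PPTassignment-16 | PPT assignment16.py | check_queue_order
-- ===== SOURCE A (Python) =====
-- def check_queue_order(queue):
--     stack = []
--     second_queue = []
--
--     while queue:
--         front_element = queue.pop(0)
--
--         # Push front element to the second queue
--         second_queue.append(front_element)
--
--         # Check if there is a consecutive element in the second queue that is greater than the front element
--         while len(second_queue) >= 2 and second_queue[-2] > second_queue[-1]:
--             # Pop the last element from the second queue and push it onto the stack
--             stack.append(second_queue.pop())
--
--     # Move elements from the stack to the second queue
--     while stack:
--         second_queue.append(stack.pop())
--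
--     # Check if the second queue is in increasing order
--     for i in range(len(second_queue) - 1):
--         if second_queue[i] >= second_queue[i + 1]:
--             return "No"
--
--     return "Yes"
-- ===== SOURCE B (Python) =====
-- def check_queue_order(queue):
--     ok = True
--     prev = None
--     while queue:
--         cur = queue.pop(0)
--         if prev is not None and prev >= cur:
--             ok = False
--         prev = cur
--     return "Yes" if ok else "No"
-- ===== Notes on version B (the rewrite author's own statement) =====
-- stated objective: simpler
-- what changed: B drops A's stack/second-queue machinery and final scan entirely: it drains the queue in one pass, comparing each element with the previous one and latching a 'No' flag, which is equivalent because A answers 'Yes' exactly when the input is already strictly increasing.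
import Mathlib
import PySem

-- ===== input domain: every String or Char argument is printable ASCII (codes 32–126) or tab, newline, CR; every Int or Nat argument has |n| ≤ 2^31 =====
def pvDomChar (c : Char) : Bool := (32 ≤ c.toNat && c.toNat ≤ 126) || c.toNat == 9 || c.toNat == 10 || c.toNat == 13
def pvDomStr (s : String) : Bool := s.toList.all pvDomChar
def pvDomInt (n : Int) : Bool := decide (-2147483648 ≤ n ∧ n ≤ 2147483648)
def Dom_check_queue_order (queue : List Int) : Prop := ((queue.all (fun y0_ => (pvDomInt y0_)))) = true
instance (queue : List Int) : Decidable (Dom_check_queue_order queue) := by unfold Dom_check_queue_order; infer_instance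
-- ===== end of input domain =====

-- B replaces A's stack/second-queue juggling by a single drain-the-queue pass with a flag (objective: simpler).
-- Both A and B mutate (empty) the argument list in Python; the equivalence proved here is about the return value.

-- ===== PORT A =====
-- second_queue is stored newest-first (reversed) so that Python's append/pop at the
-- right end become cons/uncons at the head; each loop iteration mirrors A's exactly.

-- inner while: while len(second) >= 2 and second[-2] > second[-1]: stack.append(second.pop())
def innerLoop : List Int → List Int → List Int × List Int
  | b :: a :: rest, stack => if a > b then innerLoop (a :: rest) (stack ++ [b]) else (b :: a :: rest, stack)
  | s, stack => (s, stack)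

-- outer while: front = queue.pop(0); second.append(front); inner while
def mainLoop : List Int → List Int → List Int → List Int × List Int
  | [], s, st => (s, st)
  | x :: qs, s, st =>
      let r := innerLoop (x :: s) st
      mainLoop qs r.1 r.2

-- while stack: second.append(stack.pop())   (pop = remove last)
def moveLoop : List Int → List Int → List Int
  | [], s => s
  | a :: rest, s => moveLoop ((a :: rest).dropLast) (((a :: rest).getLastD 0) :: s)
  termination_by st _ => st.length
  decreasing_by simp

-- for i in range(len(second)-1): if second[i] >= second[i+1]: return "No"; return "Yes"
def checkLoop : List Int → String
  | a :: b :: rest => if a ≥ b then "No" else checkLoop (b :: rest)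
  | _ => "Yes"

def check_queue_order (queue : List Int) : String :=
  checkLoop (moveLoop (mainLoop queue [] []).2 (mainLoop queue [] []).1).reverse

-- ===== PORT B =====
def altLoop : List Int → Option Int → Bool → Bool
  | [], _, ok => ok
  | x :: qs, prev, ok =>
      let ok' := match prev with
        | some p => if p ≥ x then false else ok
        | none => ok
      altLoop qs (some x) ok'

def check_queue_order_alt (queue : List Int) : String :=
  if altLoop queue none true then "Yes" else "No"

-- ===== PRECONDITION & SPEC =====
def Spec_check_queue_order (queue : List Int) (out : String) : Prop := out = check_queue_order_alt queue
instance (queue : List Int) (out : String) : Decidable (Spec_check_queue_order queue out) := by unfold Spec_check_queue_order; infer_instance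

-- ===== CLAIM (what is proved, stated in full; the proofs are below) =====
def Claim_equal_check_queue_order : Prop := ∀ (queue : List Int), Dom_check_queue_order queue → Spec_check_queue_order queue (check_queue_order queue)

-- ===== LEMMAS AND PROOFS =====

-- "strictly increasing" as a Bool, the common characterisation of both results
def incB : List Int → Bool
  | a :: b :: rest => decide (a < b) && incB (b :: rest)
  | _ => true

-- "weakly decreasing" (the reversed second_queue, weakly increasing in Python order)
def decB : List Int → Bool
  | a :: b :: rest => decide (b ≤ a) && decB (b :: rest)
  | _ => true

theorem checkLoop_eq (l : List Int) : checkLoop l = if incB l then "Yes" else "No" := by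
  induction l with
  | nil => simp [checkLoop, incB]
  | cons a t ih =>
      cases t with
      | nil => simp [checkLoop, incB]
      | cons b r =>
          by_cases h : a ≥ b
          · simp [checkLoop, incB, h, show ¬ a < b by omega]
          · simp [checkLoop, incB, h, show a < b by omega, ih]

theorem incB_append_false (p q : List Int) (h : incB p = false) : incB (p ++ q) = false := by
  induction p with
  | nil => simp [incB] at h
  | cons a t ih =>
      cases t with
      | nil => simp [incB] at h
      | cons b r =>
          simp only [incB, Bool.and_eq_false_iff] at h
          rcases h with h | h
          · simp [incB, h]
          · simp only [List.cons_append, incB]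
            exact Bool.and_eq_false_iff.mpr (Or.inr (by simpa using ih h))

theorem incB_snoc (p : List Int) (x : Int) (h : incB (p ++ [x]) = true) :
    incB p = true ∧ (p = [] ∨ p.getLastD 0 < x) := by
  induction p with
  | nil => simp [incB]
  | cons a t ih =>
      cases t with
      | nil => simp_all [incB]
      | cons b r =>
          simp only [List.cons_append, incB, Bool.and_eq_true] at h ⊢
          rcases ih h.2 with ⟨h1, h2⟩
          refine ⟨⟨h.1, h1⟩, ?_⟩
          rcases h2 with h2 | h2
          · simp at h2
          · right; simpa using h2

theorem headD_reverse (l : List Int) : l.reverse.headD 0 = l.getLastD 0 := by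
  rcases List.eq_nil_or_concat l with rfl | ⟨l', a, rfl⟩ <;> simp

theorem moveLoop_step (c : Int) (cs s : List Int) :
    moveLoop (c :: cs) s = moveLoop ((c :: cs).dropLast) ((c :: cs).getLastD 0 :: s) := by
  rw [moveLoop]

theorem moveLoop_eq (st : List Int) : ∀ s, moveLoop st s = st ++ s := by
  induction st using List.reverseRecOn with
  | nil => intro s; simp [moveLoop]
  | append_singleton l a ih =>
      intro s
      obtain ⟨c, cs, hcc⟩ : ∃ c cs, l ++ [a] = c :: cs := by
        cases l <;> exact ⟨_, _, rfl⟩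
      calc moveLoop (l ++ [a]) s = moveLoop l (a :: s) := by
            rw [hcc, moveLoop_step, ← hcc]; simp
        _ = l ++ a :: s := ih (a :: s)
        _ = (l ++ [a]) ++ s := by simp

-- the inner-while lemma: state after draining second_queue's tail onto the stack
theorem inner_spec (l : List Int) : ∀ (st : List Int), l ≠ [] → decB l.tail = true →
    (st ≠ [] → (st.getLastD 0 < l.headD 0) ∨ (l.tail ≠ [] ∧ st.getLastD 0 < l.tail.headD 0)) →
    (innerLoop l st).1 ≠ [] ∧ decB (innerLoop l st).1 = true ∧
      (innerLoop l st = (l, st) ∨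
        ((innerLoop l st).2 ≠ [] ∧ (innerLoop l st).2.getLastD 0 < (innerLoop l st).1.headD 0)) := by
  induction l with
  | nil => intro st hne _ _; exact absurd rfl hne
  | cons b t ih =>
      intro st _ hd hst
      cases t with
      | nil => simp [innerLoop, decB]
      | cons a rest =>
          simp only [List.tail_cons] at hd hst
          by_cases h : a > b
          · have hd' : decB rest = true := by
              cases rest with
              | nil => simp [decB]
              | cons c r =>
                  simp only [decB, Bool.and_eq_true] at hd
                  exact hd.2
            have hlast : (st ++ [b]).getLastD 0 = b := by simp
            have hrec := ih (st ++ [b]) (by simp) (by simpa using hd')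
              (by intro _; left
                  simp only [hlast, List.headD_cons]
                  exact h)
            have heq : innerLoop (b :: a :: rest) st = innerLoop (a :: rest) (st ++ [b]) := by
              simp only [innerLoop, if_pos h]
            rw [heq]
            obtain ⟨h1, h2, h3⟩ := hrec
            refine ⟨h1, h2, ?_⟩
            rcases h3 with heq2 | hlt
            · right
              rw [heq2]
              exact ⟨by simp, by simpa [hlast] using h⟩
            · right; exact hlt
          · have heq : innerLoop (b :: a :: rest) st = (b :: a :: rest, st) := by
              simp only [innerLoop, if_neg h]
            rw [heq]
            refine ⟨by simp, ?_, Or.inl rfl⟩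
            simp only [decB, Bool.and_eq_true, decide_eq_true_eq]
            constructor
            · omega
            · cases rest with
              | nil => simp [decB]
              | cons c r =>
                  simp only [decB, Bool.and_eq_true] at hd
                  simp [decB, hd.1, hd.2]

-- outer-loop invariant: p is the processed prefix, s the reversed second_queue, st the stack
def MInv (p s st : List Int) : Prop :=
  decB s = true ∧
    ((st = [] ∧ s = p.reverse) ∨
     (st ≠ [] ∧ s ≠ [] ∧ st.getLastD 0 < s.headD 0 ∧ incB p = false))

theorem main_spec (qs : List Int) : ∀ (p s st : List Int), MInv p s st →
    MInv (p ++ qs) (mainLoop qs s st).1 (mainLoop qs s st).2 := by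
  induction qs with
  | nil => intro p s st h; simpa [mainLoop] using h
  | cons x qs ih =>
      intro p s st h
      simp only [mainLoop]
      have hstep : MInv (p ++ [x]) (innerLoop (x :: s) st).1 (innerLoop (x :: s) st).2 := by
        obtain ⟨hdec, hcase⟩ := h
        have hI := inner_spec (x :: s) st (by simp) (by simpa using hdec)
          (by intro hstne
              rcases hcase with ⟨he, _⟩ | ⟨_, hsne, hlt, _⟩
              · exact absurd he hstne
              · right; exact ⟨hsne, by simpa using hlt⟩)
        obtain ⟨hne', hdec', hdisj⟩ := hI
        rcases hdisj with heq | ⟨hstne', hlt'⟩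
        · rw [heq] at hdec' ⊢
          rcases hcase with ⟨he, hs⟩ | ⟨hstne, hsne, hlt, hip⟩
          · exact ⟨hdec', Or.inl ⟨he, by simp [hs]⟩⟩
          · refine ⟨hdec', Or.inr ⟨hstne, by simp, ?_, incB_append_false _ _ hip⟩⟩
            cases s with
            | nil => exact absurd rfl hsne
            | cons h0 t0 =>
                simp only [decB, Bool.and_eq_true, decide_eq_true_eq] at hdec'
                simp only [List.headD_cons] at hlt ⊢
                omega
        · refine ⟨hdec', Or.inr ⟨hstne', hne', hlt', ?_⟩⟩
          rcases hcase with ⟨he, hs⟩ | ⟨_, _, _, hip⟩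
          · by_contra hfire
            have hfire' : incB (p ++ [x]) = true := by
              revert hfire; cases incB (p ++ [x]) <;> simp
            obtain ⟨_, hpl⟩ := incB_snoc p x hfire'
            have hnofire : innerLoop (x :: s) st = (x :: s, st) := by
              rcases hpl with rfl | hplt
              · simp only [List.reverse_nil] at hs
                rw [hs]
                simp [innerLoop]
              · have hh : s.headD 0 = p.getLastD 0 := by
                  rw [hs]; exact headD_reverse p
                cases s with
                | nil => simp [innerLoop]
                | cons h0 t0 =>
                    have hx : ¬ h0 > x := by
                      simp only [List.headD_cons] at hh
                      omega
                    simp [innerLoop, hx]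
            rw [hnofire] at hstne'
            exact hstne' he
          · exact incB_append_false _ _ hip
      have := ih (p ++ [x]) _ _ hstep
      simpa using this

theorem checkLoop_mid (l1 : List Int) (a b : Int) (l2 : List Int) (h : b ≤ a) :
    checkLoop (l1 ++ a :: b :: l2) = "No" := by
  induction l1 with
  | nil => simp [checkLoop, h]
  | cons c t ih =>
      cases t with
      | nil => by_cases hc : c ≥ a <;> simp [checkLoop, hc, h]
      | cons d r =>
          by_cases hc : c ≥ d
          · simp [checkLoop, hc]
          · simp only [List.cons_append, checkLoop, if_neg hc] at ih ⊢
            exact ih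

theorem final_no (s st : List Int) (hstne : st ≠ []) (hsne : s ≠ [])
    (hlt : st.getLastD 0 < s.headD 0) : checkLoop ((st ++ s).reverse) = "No" := by
  rcases List.eq_nil_or_concat st with rfl | ⟨st', g, rfl⟩
  · exact absurd rfl hstne
  · simp only [List.concat_eq_append] at hstne hlt ⊢
    cases s with
    | nil => exact absurd rfl hsne
    | cons h0 t0 =>
        have hg : (st' ++ [g]).getLastD 0 = g := by simp
        rw [show (((st' ++ [g]) ++ h0 :: t0)).reverse
              = t0.reverse ++ h0 :: g :: st'.reverse by simp]
        refine checkLoop_mid _ _ _ _ ?_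
        rw [hg] at hlt
        simp only [List.headD_cons] at hlt
        omega

theorem a_eq_inc (q : List Int) : check_queue_order q = if incB q then "Yes" else "No" := by
  have h0 : MInv [] ([] : List Int) [] := ⟨by simp [decB], Or.inl ⟨rfl, rfl⟩⟩
  have h := main_spec q [] [] [] h0
  simp only [List.nil_append] at h
  obtain ⟨hdec, hcase⟩ := h
  unfold check_queue_order
  rw [moveLoop_eq]
  rcases hcase with ⟨he, hs⟩ | ⟨hstne, hsne, hlt, hip⟩
  · rw [he, hs]
    simp [checkLoop_eq]
  · rw [final_no _ _ hstne hsne hlt, hip]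
    simp

theorem alt_loop_some (qs : List Int) : ∀ (p : Int) (ok : Bool),
    altLoop qs (some p) ok = (ok && incB (p :: qs)) := by
  induction qs with
  | nil => intro p ok; simp [altLoop, incB]
  | cons x qs ih =>
      intro p ok
      simp only [altLoop, ih]
      by_cases h : p ≥ x
      · simp [h, incB, show ¬ p < x by omega]
      · simp [h, incB, show p < x by omega]

theorem b_eq_inc (q : List Int) : check_queue_order_alt q = if incB q then "Yes" else "No" := by
  unfold check_queue_order_alt
  cases q with
  | nil => simp [altLoop, incB]
  | cons x qs => simp [altLoop, alt_loop_some]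

-- ===== VERDICT (by name: the statement is the Claim_ definition above) =====
theorem check_queue_order_spec : Claim_equal_check_queue_order := by
  intro queue _
  unfold Spec_check_queue_order
  rw [a_eq_inc, b_eq_inc]
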